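-- pv_equiv track=rewrite | github.com/amshrestha2020/CodeSignal | CodeSignal/Core/Cipher26.py | solution
-- ===== SOURCE A (Python) =====
-- def solution(message):
--     sum_val = 0
--     res = []
--     char_code_a = ord('a')
--
--     for char in message:
--         cur_char_code = ord(char) - char_code_a
--
--         decrypted_char_code = cur_char_code - sum_val
--         if sum_val > cur_char_code:
--             decrypted_char_code += 26
--
--         res.append(chr(decrypted_char_code + char_code_a))
--         sum_val = cur_char_code
--
--     return ''.join(res)
-- ===== SOURCE B (Python) =====
-- def solution(message):
--     # Divide and conquer: decrypt a segment by splitting it in half;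
--     # the right half's predecessor code is the last character of the left half.
--     def dc(seg, prev):
--         if len(seg) == 1:
--             cur = ord(seg[0]) - 97
--             d = cur - prev
--             if prev > cur:
--                 d += 26
--             return chr(d + 97)
--         mid = len(seg) // 2
--         return dc(seg[:mid], prev) + dc(seg[mid:], ord(seg[mid - 1]) - 97)
--     return dc(message, 0) if message else ""
-- ===== Notes on version B (the rewrite author's own statement) =====
-- stated objective: alternative
-- what changed: Replaces A's single left-to-right loop carrying a running previous-code state with a recursive divide-and-conquer: the message is split in half, each half is decrypted independently (the right half seeded with the left half's last character code), and the results are concatenated.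
import Mathlib
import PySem

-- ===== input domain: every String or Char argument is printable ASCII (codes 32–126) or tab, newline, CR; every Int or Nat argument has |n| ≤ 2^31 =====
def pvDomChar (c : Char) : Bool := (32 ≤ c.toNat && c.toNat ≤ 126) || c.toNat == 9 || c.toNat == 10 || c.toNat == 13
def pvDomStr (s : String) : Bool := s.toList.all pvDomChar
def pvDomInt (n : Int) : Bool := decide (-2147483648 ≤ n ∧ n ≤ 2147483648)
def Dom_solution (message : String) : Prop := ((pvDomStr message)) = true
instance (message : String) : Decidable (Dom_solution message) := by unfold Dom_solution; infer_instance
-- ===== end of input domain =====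

-- B replaces A's single running-state loop with a recursive divide-and-conquer over halves (alternative decomposition, same result).

-- ===== PORT A =====
-- one loop iteration: state is (sum_val, res); cur = ord(char) - 97,
-- decrypted = cur - sum_val (+26 if sum_val > cur), append chr(decrypted + 97)
def solutionStep (st : Int × List Char) (c : Char) : Int × List Char :=
  let cur : Int := (c.toNat : Int) - 97
  let d0 := cur - st.1
  let d := if st.1 > cur then d0 + 26 else d0
  (cur, st.2 ++ [Char.ofNat (d + 97).toNat])

def solution (message : String) : String :=
  String.mk (message.toList.foldl solutionStep (0, [])).2

-- ===== PORT B =====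
-- base case of dc: decrypt one character given the previous code
def dcChar (prev : Int) (c : Char) : Char :=
  let cur : Int := (c.toNat : Int) - 97
  let d0 := cur - prev
  let d := if prev > cur then d0 + 26 else d0
  Char.ofNat (d + 97).toNat

-- dc(seg, prev): split at mid = len // 2; right half seeded with seg[mid-1]'s code.
-- (dc is never called on an empty segment; the [] case is unreachable.)
def dcRun : List Char → Int → List Char
  | [], _ => []
  | [c], prev => [dcChar prev c]
  | a :: b :: rest, prev =>
      let mid := (a :: b :: rest).length / 2
      dcRun ((a :: b :: rest).take mid) prev ++
        dcRun ((a :: b :: rest).drop mid) ((((a :: b :: rest).getD (mid - 1) ' ').toNat : Int) - 97)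
termination_by l _ => l.length
decreasing_by
  · simp [List.length_take, List.length_cons]; omega
  · simp [List.length_drop, List.length_cons]; omega

def solution_alt (message : String) : String :=
  if message.toList.isEmpty then "" else String.mk (dcRun message.toList 0)

-- ===== PRECONDITION & SPEC =====
def Spec_solution (message : String) (out : String) : Prop := out = solution_alt message
instance (message : String) (out : String) : Decidable (Spec_solution message out) := by unfold Spec_solution; infer_instance

-- ===== CLAIM (what is proved, stated in full; the proofs are below) =====
def Claim_equal_solution : Prop := ∀ (message : String), Dom_solution message → Spec_solution message (solution message)

-- ===== LEMMAS AND PROOFS =====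

-- proof-only reference: the simple left-to-right recursion both ports equal
def runSpec : List Char → Int → List Char
  | [], _ => []
  | c :: cs, prev => dcChar prev c :: runSpec cs ((c.toNat : Int) - 97)

lemma solution_fold_eq (l : List Char) (s : Int) (acc : List Char) :
    (l.foldl solutionStep (s, acc)).2 = acc ++ runSpec l s := by
  induction l generalizing s acc with
  | nil => simp [runSpec]
  | cons c cs ih =>
    simp only [List.foldl_cons, runSpec]
    rw [ih]
    simp [solutionStep, dcChar]

lemma runSpec_append (l1 l2 : List Char) (prev : Int) (h : l1 ≠ []) :
    runSpec (l1 ++ l2) prev =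
      runSpec l1 prev ++ runSpec l2 (((l1.getLast h).toNat : Int) - 97) := by
  induction l1 generalizing prev with
  | nil => exact absurd rfl h
  | cons c cs ih =>
    cases cs with
    | nil => simp [runSpec]
    | cons d ds =>
      have h1 : runSpec ((c :: d :: ds) ++ l2) prev
          = dcChar prev c :: runSpec ((d :: ds) ++ l2) ((c.toNat : Int) - 97) := rfl
      rw [h1, ih _ (by simp)]
      simp [runSpec, List.getLast_cons]

lemma take_getLast (l : List Char) (m : Nat) (h1 : 0 < m) (h2 : m ≤ l.length)
    (hne : l.take m ≠ []) :
    ((l.take m).getLast hne) = l.getD (m - 1) ' ' := by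
  have hlen : (l.take m).length = m := by simp; omega
  have h3 : m - 1 < l.length := by omega
  rw [List.getLast_eq_getElem, List.getD_eq_getElem _ _ h3]
  rw [List.getElem_take]
  congr 1
  omega

lemma dcRun_eq_runSpec (l : List Char) (prev : Int) : dcRun l prev = runSpec l prev := by
  induction l, prev using dcRun.induct with
  | case1 prev => simp [dcRun, runSpec]
  | case2 c prev => simp [dcRun, runSpec]
  | case3 a b rest prev mid ihT ihD =>
    have hne : (a :: b :: rest).take ((a :: b :: rest).length / 2) ≠ [] := by
      intro he
      have := congrArg List.length he
      simp at this
    rw [dcRun]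
    simp only [mid] at ihT ihD
    simp only [ihT, ihD]
    rw [← take_getLast (a :: b :: rest) ((a :: b :: rest).length / 2)
          (by simp) (Nat.div_le_self _ _) hne,
        ← runSpec_append _ _ prev hne,
        List.take_append_drop]

-- ===== VERDICT (by name: the statement is the Claim_ definition above) =====
theorem solution_spec : Claim_equal_solution := by
  intro message _
  unfold Spec_solution solution solution_alt
  rw [solution_fold_eq]
  cases h : message.toList with
  | nil => rfl
  | cons c cs => simp [dcRun_eq_runSpec]
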